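-- pv_equiv track=rewrite | github.com/h3x89/hackerrank | codesignal/93.1.3.py | solution
-- ===== SOURCE A (Python) =====
-- def solution(listA, listB):
--     # Create a set of unique values from listB to avoid duplicates
--     seen_pairs = set()
--     result = []
--     for a in listA:
--         for b in listB:
--             if a > b and (a, b) not in seen_pairs:
--                 result.append((a, b))
--                 seen_pairs.add((a, b))
--     return result
-- ===== SOURCE B (Python) =====
-- def solution(listA, listB):
--     uniqA = list(dict.fromkeys(listA))
--     uniqB = list(dict.fromkeys(listB))
--     return [(a, b) for a in uniqA for b in uniqB if a > b]
-- ===== Notes on version B (the rewrite author's own statement) =====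
-- stated objective: simpler
-- what changed: Deduplicate both lists up front (order-preserving dict.fromkeys) so the main pass is a plain comprehension with no seen-set and no membership test.
import Mathlib
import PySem

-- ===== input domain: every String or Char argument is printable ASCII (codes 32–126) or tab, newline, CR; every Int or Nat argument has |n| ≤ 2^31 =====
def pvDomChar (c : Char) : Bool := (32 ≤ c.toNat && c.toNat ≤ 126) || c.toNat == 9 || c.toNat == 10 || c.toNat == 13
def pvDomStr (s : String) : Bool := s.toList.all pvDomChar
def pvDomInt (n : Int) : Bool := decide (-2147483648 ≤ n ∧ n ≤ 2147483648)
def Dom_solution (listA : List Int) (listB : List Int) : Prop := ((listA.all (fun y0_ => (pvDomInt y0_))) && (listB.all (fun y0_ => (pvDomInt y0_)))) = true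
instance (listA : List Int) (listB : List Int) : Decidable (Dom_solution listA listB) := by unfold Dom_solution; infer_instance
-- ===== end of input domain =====

-- B deduplicates both lists up front (order-preserving), so its main pass is a plain
-- comprehension with no seen-set; objective: simpler.

-- ===== PORT A =====
-- A-side helpers: the loop bodies of A's two nested for-loops, named for the fold.
def pvIStep (a : Int) (st : PySem.Set (Int × Int) × List (Int × Int)) (b : Int) :
    PySem.Set (Int × Int) × List (Int × Int) :=
  if a > b ∧ (a, b) ∉ st.1 then (PySem.Set.add st.1 (a, b), st.2 ++ [(a, b)]) else st

def pvOStep (listB : List Int) (st : PySem.Set (Int × Int) × List (Int × Int)) (a : Int) :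
    PySem.Set (Int × Int) × List (Int × Int) :=
  listB.foldl (pvIStep a) st

def solution (listA : List Int) (listB : List Int) : List (Int × Int) :=
  (listA.foldl (pvOStep listB) (PySem.Set.empty, [])).2

-- ===== PORT B =====
def solution_alt (listA : List Int) (listB : List Int) : List (Int × Int) :=
  (PySem.List.dedup listA).flatMap (fun a =>
    ((PySem.List.dedup listB).filter (fun b => decide (a > b))).map (fun b => (a, b)))

-- ===== PRECONDITION & SPEC =====
def Spec_solution (listA : List Int) (listB : List Int) (out : List (Int × Int)) : Prop := out = solution_alt listA listB
instance (listA : List Int) (listB : List Int) (out : List (Int × Int)) : Decidable (Spec_solution listA listB out) := by unfold Spec_solution; infer_instance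

-- ===== CLAIM (what is proved, stated in full; the proofs are below) =====
def Claim_equal_solution : Prop := ∀ (listA : List Int) (listB : List Int), Dom_solution listA listB → Spec_solution listA listB (solution listA listB)

-- ===== LEMMAS AND PROOFS =====

-- dedup of bs, relative to an already-seen list: keeps first occurrences not in `seen`.
def pvDFrom (seen : List Int) (bs : List Int) : List Int :=
  match bs with
  | [] => []
  | b :: bs => if b ∈ seen then pvDFrom seen bs else b :: pvDFrom (seen ++ [b]) bs

lemma pvDFrom_eq_filter (bs : List Int) : ∀ seen : List Int,
    pvDFrom seen bs = (PySem.List.dedup bs).filter (fun y => decide (y ∉ seen)) := by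
  induction bs with
  | nil => intro seen; simp [pvDFrom, PySem.List.dedup_eq_ofList, PySem.Set.ofList_nil]
  | cons b bs ih =>
    intro seen
    rw [pvDFrom, PySem.List.dedup_eq_ofList, PySem.Set.ofList_cons, PySem.Set.discard,
      ← PySem.List.dedup_eq_ofList]
    split_ifs with hb
    · rw [ih seen]
      simp only [List.filter_cons, hb, not_true, decide_false,
        Bool.false_eq_true, if_false, List.filter_filter]
      apply List.filter_congr
      intro y _
      by_cases hy : y = b <;> simp [hy, hb]
    · rw [ih (seen ++ [b])]
      simp only [List.filter_cons, hb, not_false_iff, decide_true, if_true,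
        List.filter_filter]
      congr 1
      apply List.filter_congr
      intro y _
      by_cases hy : y = b <;> simp [hy, hb]

lemma pvDFrom_eq_nil (bs : List Int) : ∀ seen : List Int, (∀ b ∈ bs, b ∈ seen) → pvDFrom seen bs = [] := by
  induction bs with
  | nil => intro seen _; rfl
  | cons b bs ih =>
    intro seen h
    rw [pvDFrom, if_pos (h b (by simp))]
    exact ih seen (fun x hx => h x (by simp [hx]))

lemma pvDedup_filter (p : Int → Bool) (xs : List Int) :
    PySem.List.dedup (xs.filter p) = (PySem.List.dedup xs).filter p := by
  induction xs with
  | nil => simp [PySem.List.dedup_eq_ofList, PySem.Set.ofList_nil]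
  | cons x xs ih =>
    simp only [PySem.List.dedup_eq_ofList] at *
    rw [List.filter_cons]
    by_cases hp : p x = true
    · rw [if_pos hp, PySem.Set.ofList_cons, PySem.Set.ofList_cons, PySem.Set.discard,
        PySem.Set.discard, List.filter_cons, if_pos hp, ih, List.filter_filter,
        List.filter_filter]
      congr 1
      apply List.filter_congr
      intro y _
      by_cases hy : y = x <;> simp [hy, Bool.and_comm]
    · rw [if_neg hp, PySem.Set.ofList_cons, List.filter_cons, if_neg hp, ih,
        PySem.Set.discard, List.filter_filter]
      apply List.filter_congr
      intro y _
      by_cases hy : y = x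
      · subst hy; simp [hp]
      · simp [hy]

lemma pvInner_spec (a : Int) (bs : List Int) :
    ∀ (s : PySem.Set (Int × Int)) (r : List (Int × Int)) (sB : List Int),
    (∀ y : Int, (a, y) ∈ s ↔ (y ∈ sB ∧ a > y)) →
    bs.foldl (pvIStep a) (s, r) =
      (s ++ (pvDFrom sB (bs.filter (fun b => decide (a > b)))).map (fun b => (a, b)),
       r ++ (pvDFrom sB (bs.filter (fun b => decide (a > b)))).map (fun b => (a, b))) := by
  induction bs with
  | nil => intro s r sB _; simp [pvDFrom]
  | cons b bs ih =>
    intro s r sB hs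
    rw [List.foldl_cons, List.filter_cons]
    by_cases hab : a > b
    · rw [if_pos (by simpa using hab)]
      by_cases hseen : b ∈ sB
      · have hmem : (a, b) ∈ s := (hs b).2 ⟨hseen, hab⟩
        have : pvIStep a (s, r) b = (s, r) := by
          simp [pvIStep, hmem]
        rw [this, pvDFrom, if_pos hseen]
        exact ih s r sB hs
      · have hmem : (a, b) ∉ s := fun h => hseen ((hs b).1 h).1
        have hstep : pvIStep a (s, r) b = (s ++ [(a, b)], r ++ [(a, b)]) := by
          simp only [pvIStep]
          rw [if_pos ⟨hab, hmem⟩, PySem.Set.add_of_not_mem hmem]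
        rw [hstep, pvDFrom, if_neg hseen]
        rw [ih (s ++ [(a, b)]) (r ++ [(a, b)]) (sB ++ [b]) ?_]
        · simp
        · intro y
          constructor
          · intro hy
            rcases List.mem_append.1 hy with h | h
            · rcases (hs y).1 h with ⟨h1, h2⟩; exact ⟨by simp [h1], h2⟩
            · simp at h; subst h; exact ⟨by simp, hab⟩
          · rintro ⟨h1, h2⟩
            rcases List.mem_append.1 h1 with h | h
            · exact List.mem_append.2 (Or.inl ((hs y).2 ⟨h, h2⟩))
            · simp at h; subst h; simp
    · rw [if_neg (by simpa using hab)]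
      have : pvIStep a (s, r) b = (s, r) := by
        simp [pvIStep, hab]
      rw [this]
      exact ih s r sB hs

lemma pvOuter_spec (listB : List Int) (as' : List Int) :
    ∀ (s : PySem.Set (Int × Int)) (r : List (Int × Int)) (sA : List Int),
    (∀ x y : Int, (x, y) ∈ s ↔ (x ∈ sA ∧ y ∈ listB ∧ x > y)) →
    (as'.foldl (pvOStep listB) (s, r)).2 =
      r ++ (pvDFrom sA as').flatMap (fun a =>
        ((PySem.List.dedup listB).filter (fun b => decide (a > b))).map (fun b => (a, b))) := by
  induction as' with
  | nil => intro s r sA _; simp [pvDFrom]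
  | cons a as ih =>
    intro s r sA hs
    rw [List.foldl_cons, pvOStep]
    by_cases ha : a ∈ sA
    · have hinner := pvInner_spec a listB s r listB (fun y => by
        rw [hs a y]; constructor
        · rintro ⟨_, h2, h3⟩; exact ⟨h2, h3⟩
        · rintro ⟨h1, h2⟩; exact ⟨ha, h1, h2⟩)
      rw [pvDFrom_eq_nil _ listB (fun b hb => (List.mem_filter.1 hb).1)] at hinner
      simp only [List.map_nil, List.append_nil] at hinner
      rw [hinner, ih s r sA hs,
        show pvDFrom sA (a :: as) = pvDFrom sA as from by rw [pvDFrom, if_pos ha]]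
    · have hrow : pvDFrom [] (listB.filter (fun b => decide (a > b))) =
          (PySem.List.dedup listB).filter (fun b => decide (a > b)) := by
        rw [pvDFrom_eq_filter, pvDedup_filter]
        simp
      have hinner := pvInner_spec a listB s r [] (fun y => by simp [hs a y, ha])
      rw [hrow] at hinner
      rw [hinner]
      have hinv : ∀ x y : ℤ,
          (x, y) ∈ s ++ ((PySem.List.dedup listB).filter (fun b => decide (a > b))).map
              (fun b => (a, b)) ↔ (x ∈ sA ++ [a] ∧ y ∈ listB ∧ x > y) := by
        intro x y
        simp only [List.mem_append, List.mem_map, List.mem_filter, PySem.List.mem_dedup,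
          Prod.ext_iff, hs, List.mem_singleton, decide_eq_true_eq]
        constructor
        · rintro (⟨h1, h2, h3⟩ | ⟨b, ⟨hb1, hb2⟩, hx, hy⟩)
          · exact ⟨Or.inl h1, h2, h3⟩
          · subst hx; subst hy; exact ⟨Or.inr rfl, hb1, hb2⟩
        · rintro ⟨h1 | h1, h2, h3⟩
          · exact Or.inl ⟨h1, h2, h3⟩
          · subst h1; exact Or.inr ⟨y, ⟨h2, h3⟩, rfl, rfl⟩
      rw [ih _ _ (sA ++ [a]) hinv,
        show pvDFrom sA (a :: as) = a :: pvDFrom (sA ++ [a]) as from by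
          rw [pvDFrom, if_neg ha]]
      simp

-- ===== VERDICT (by name: the statement is the Claim_ definition above) =====
theorem solution_spec : Claim_equal_solution := by
  intro listA listB _
  unfold Spec_solution solution solution_alt
  rw [pvOuter_spec listB listA PySem.Set.empty [] []
    (by intro x y; simp [PySem.Set.empty])]
  rw [pvDFrom_eq_filter]
  simp
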